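-- pv_equiv track=rewrite | github.com/brunocamarggo/contextual-extractor | contextual_extractor.py | do_dictionary_label_list
-- ===== SOURCE A (Python) =====
-- def do_dictionary_label_list(image):
--     dictionary = {}
--     label_list = []
--     count = 0
--     for i, row in enumerate(image):
--         for j, pixel in enumerate(row):
--             label_list.append(str(count))
--             dictionary["({}, {})".format(i, j)] = count
--             count += 1
--     return dictionary, label_list
-- ===== SOURCE B (Python) =====
-- def do_dictionary_label_list(image):
--     # pass 1: prefix-sum of row lengths -> starting index of each row
--     offsets = []
--     total = 0
--     for row in image:
--         offsets.append(total)
--         total += len(row)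
--     # pass 2: dict from coordinates, value computed arithmetically
--     dictionary = {"({}, {})".format(i, j): offsets[i] + j
--                   for i in range(len(image))
--                   for j in range(len(image[i]))}
--     # labels are just the consecutive indices 0..total-1
--     label_list = [str(k) for k in range(total)]
--     return dictionary, label_list
-- ===== Notes on version B (the rewrite author's own statement) =====
-- stated objective: alternative
-- what changed: A builds dict and label list together in one interleaved nested loop carrying a running counter; B first computes prefix-sum row offsets, then builds the dict with values derived arithmetically as offsets[i]+j, and reconstructs the label list separately as str(k) for k in range(total).
import Mathlib
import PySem

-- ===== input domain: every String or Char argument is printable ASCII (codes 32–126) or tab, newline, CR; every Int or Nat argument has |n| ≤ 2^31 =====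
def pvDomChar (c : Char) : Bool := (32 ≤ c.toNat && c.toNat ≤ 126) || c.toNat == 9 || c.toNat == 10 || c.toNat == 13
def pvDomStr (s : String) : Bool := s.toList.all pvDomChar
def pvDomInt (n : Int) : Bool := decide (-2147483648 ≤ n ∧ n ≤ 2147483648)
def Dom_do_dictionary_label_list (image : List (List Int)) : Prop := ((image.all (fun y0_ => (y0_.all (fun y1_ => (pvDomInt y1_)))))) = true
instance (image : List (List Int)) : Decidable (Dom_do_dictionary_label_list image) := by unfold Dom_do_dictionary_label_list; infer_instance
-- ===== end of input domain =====

-- B replaces A's single interleaved loop (dict + labels + running counter) by a prefix-sum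
-- offsets pass, a dict pass whose values are computed arithmetically as offsets[i]+j, and a
-- range-based reconstruction of the label list; objective: alternative (same cost).

-- ===== PORT A =====
-- shared helper: the Python key string "({}, {})".format(i, j)
def pvKey (i j : Int) : String := "(" ++ PySem.Int.toStr i ++ ", " ++ PySem.Int.toStr j ++ ")"

def do_dictionary_label_list (image : List (List Int)) : (List (String × Int)) × List String :=
  let st :=
    (PySem.List.enumerate image).foldl
      (fun (st : PySem.Dict String Int × List String × Int) (ir : Int × List Int) =>
        (PySem.List.enumerate ir.2).foldl
          (fun (st : PySem.Dict String Int × List String × Int) (jp : Int × Int) =>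
            (st.1.insert (pvKey ir.1 jp.1) st.2.2,
             st.2.1 ++ [PySem.Int.toStr st.2.2],
             st.2.2 + 1)) st)
      (PySem.Dict.empty, [], 0)
  (st.1.items, st.2.1)

-- ===== PORT B =====
def do_dictionary_label_list_alt (image : List (List Int)) : (List (String × Int)) × List String :=
  let ot := image.foldl (fun (p : List Int × Int) row => (p.1 ++ [p.2], p.2 + (row.length : Int))) ([], 0)
  let dictionary :=
    (PySem.List.pyRange 0 (image.length : Int) 1).foldl
      (fun (d : PySem.Dict String Int) i =>
        (PySem.List.pyRange 0 ((PySem.List.pyGetD image i []).length : Int) 1).foldl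
          (fun d j => d.insert (pvKey i j) (PySem.List.pyGetD ot.1 i 0 + j)) d)
      PySem.Dict.empty
  (dictionary.items, (PySem.List.pyRange 0 ot.2 1).map PySem.Int.toStr)

-- ===== PRECONDITION & SPEC =====
def Spec_do_dictionary_label_list (image : List (List Int)) (out : (List (String × Int)) × List String) : Prop := out = do_dictionary_label_list_alt image
instance (image : List (List Int)) (out : (List (String × Int)) × List String) : Decidable (Spec_do_dictionary_label_list image out) := by unfold Spec_do_dictionary_label_list; infer_instance

-- ===== CLAIM (what is proved, stated in full; the proofs are below) =====
def Claim_equal_do_dictionary_label_list : Prop := ∀ (image : List (List Int)), Dom_do_dictionary_label_list image → Spec_do_dictionary_label_list image (do_dictionary_label_list image)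

-- ===== LEMMAS AND PROOFS =====

-- the offsets/total accumulator of B
def pvOT (image : List (List Int)) : List Int × Int :=
  image.foldl (fun (p : List Int × Int) row => (p.1 ++ [p.2], p.2 + (row.length : Int))) ([], 0)

-- B's dictionary
def pvDictB (image : List (List Int)) : PySem.Dict String Int :=
  (PySem.List.pyRange 0 (image.length : Int) 1).foldl
    (fun (d : PySem.Dict String Int) i =>
      (PySem.List.pyRange 0 ((PySem.List.pyGetD image i []).length : Int) 1).foldl
        (fun d j => d.insert (pvKey i j) (PySem.List.pyGetD (pvOT image).1 i 0 + j)) d)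
    PySem.Dict.empty

lemma pvOT_snoc (xs : List (List Int)) (x : List Int) :
    pvOT (xs ++ [x]) = ((pvOT xs).1 ++ [(pvOT xs).2], (pvOT xs).2 + (x.length : Int)) := by
  simp [pvOT, List.foldl_append]

lemma pvOT_snd_nonneg (xs : List (List Int)) : 0 ≤ (pvOT xs).2 := by
  induction xs using List.reverseRecOn with
  | nil => simp [pvOT]
  | append_singleton xs x ih => rw [pvOT_snoc]; omega

lemma pvOT_fst_length (xs : List (List Int)) : (pvOT xs).1.length = xs.length := by
  induction xs using List.reverseRecOn with
  | nil => simp [pvOT]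
  | append_singleton xs x ih => rw [pvOT_snoc]; simp [ih]

lemma pyGetD_append_left {α : Type} (xs ys : List α) (i : Int) (d : α)
    (h0 : 0 ≤ i) (h : i < (xs.length : Int)) :
    PySem.List.pyGetD (xs ++ ys) i d = PySem.List.pyGetD xs i d := by
  have hlt : i.toNat < xs.length := by omega
  rw [PySem.List.pyGetD_eq_getElem xs d h0 h,
      PySem.List.pyGetD_eq_getElem (xs ++ ys) d h0 (by simp; omega),
      List.getElem_append_left hlt]

-- A's inner loop over one row, from an arbitrary state
lemma pv_innerRange (i : Int) (n : Nat) (c : Int) (d : PySem.Dict String Int) (ls : List String) :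
    (PySem.List.pyRange 0 (n : Int) 1).foldl
      (fun (st : PySem.Dict String Int × List String × Int) (j : Int) =>
        (st.1.insert (pvKey i j) st.2.2,
         st.2.1 ++ [PySem.Int.toStr st.2.2],
         st.2.2 + 1)) (d, ls, c)
    = ((PySem.List.pyRange 0 (n : Int) 1).foldl (fun d j => d.insert (pvKey i j) (c + j)) d,
       ls ++ (PySem.List.pyRange c (c + (n : Int)) 1).map PySem.Int.toStr,
       c + (n : Int)) := by
  induction n with
  | zero => simp [PySem.List.pyRange_one_eq_nil]
  | succ n ih =>
    have h1 : ((n + 1 : Nat) : Int) = (n : Int) + 1 := by push_cast; ring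
    have h2 : c + ((n : Int) + 1) = (c + (n : Int)) + 1 := by ring
    rw [h1, h2, PySem.List.pyRange_one_succ_right (by positivity),
        PySem.List.pyRange_one_succ_right (by omega),
        List.foldl_append, List.foldl_append, ih]
    simp

lemma pv_innerA (i c : Int) (d : PySem.Dict String Int) (ls : List String) (row : List Int) :
    (PySem.List.enumerate row).foldl
      (fun (st : PySem.Dict String Int × List String × Int) (jp : Int × Int) =>
        (st.1.insert (pvKey i jp.1) st.2.2,
         st.2.1 ++ [PySem.Int.toStr st.2.2],
         st.2.2 + 1)) (d, ls, c)
    = ((PySem.List.pyRange 0 (row.length : Int) 1).foldl (fun d j => d.insert (pvKey i j) (c + j)) d,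
       ls ++ (PySem.List.pyRange c (c + (row.length : Int)) 1).map PySem.Int.toStr,
       c + (row.length : Int)) := by
  have hmap : ((PySem.List.enumerate row).map (·.1)).foldl
      (fun (st : PySem.Dict String Int × List String × Int) (j : Int) =>
        (st.1.insert (pvKey i j) st.2.2,
         st.2.1 ++ [PySem.Int.toStr st.2.2],
         st.2.2 + 1)) (d, ls, c)
      = (PySem.List.enumerate row).foldl
      (fun (st : PySem.Dict String Int × List String × Int) (jp : Int × Int) =>
        (st.1.insert (pvKey i jp.1) st.2.2,
         st.2.1 ++ [PySem.Int.toStr st.2.2],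
         st.2.2 + 1)) (d, ls, c) := List.foldl_map (f := fun (jp : Int × Int) => jp.1)
  rw [← hmap, PySem.List.map_fst_enumerate]
  simpa using pv_innerRange i row.length c d ls

-- the outer loop: A's full state equals B's three components
lemma pv_outer (image : List (List Int)) :
    (PySem.List.enumerate image).foldl
      (fun (st : PySem.Dict String Int × List String × Int) (ir : Int × List Int) =>
        (PySem.List.enumerate ir.2).foldl
          (fun (st : PySem.Dict String Int × List String × Int) (jp : Int × Int) =>
            (st.1.insert (pvKey ir.1 jp.1) st.2.2,
             st.2.1 ++ [PySem.Int.toStr st.2.2],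
             st.2.2 + 1)) st)
      (PySem.Dict.empty, [], 0)
    = (pvDictB image, (PySem.List.pyRange 0 (pvOT image).2 1).map PySem.Int.toStr, (pvOT image).2) := by
  induction image using List.reverseRecOn with
  | nil => simp [pvDictB, pvOT, PySem.List.pyRange_one_eq_nil]
  | append_singleton xs x ih =>
    have hc0 : 0 ≤ (pvOT xs).2 := pvOT_snd_nonneg xs
    -- A side: split off the last row
    rw [PySem.List.enumerate_append, List.foldl_append, ih]
    have hx : PySem.List.enumerate [x] ((0 : Int) + (xs.length : Int)) = [((xs.length : Int), x)] := by
      simp [PySem.List.enumerate_cons, PySem.List.enumerate_nil]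
    rw [hx]
    simp only [List.foldl_cons, List.foldl_nil]
    rw [pv_innerA (xs.length : Int) (pvOT xs).2 (pvDictB xs) _ x]
    -- B side: compute the three components for xs ++ [x]
    rw [pvOT_snoc]
    refine Prod.ext ?_ (Prod.ext ?_ rfl)
    · -- dictionaries
      show _ = pvDictB (xs ++ [x])
      unfold pvDictB
      rw [pvOT_snoc]
      have hlen : ((xs ++ [x]).length : Int) = (xs.length : Int) + 1 := by simp
      rw [hlen, PySem.List.pyRange_one_succ_right (by positivity), List.foldl_append]
      have hpref :
          (PySem.List.pyRange 0 (xs.length : Int) 1).foldl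
            (fun (d : PySem.Dict String Int) i =>
              (PySem.List.pyRange 0 ((PySem.List.pyGetD (xs ++ [x]) i []).length : Int) 1).foldl
                (fun d j => d.insert (pvKey i j) (PySem.List.pyGetD ((pvOT xs).1 ++ [(pvOT xs).2]) i 0 + j)) d)
            PySem.Dict.empty
          = pvDictB xs := by
        unfold pvDictB
        apply PySem.List.foldl_congr_mem
        intro acc i hi
        have hib := (PySem.List.mem_pyRange_one).1 hi
        rw [pyGetD_append_left xs [x] i [] hib.1 hib.2,
            pyGetD_append_left (pvOT xs).1 [(pvOT xs).2] i 0 hib.1 (by rw [pvOT_fst_length]; exact hib.2)]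
      rw [hpref]
      simp only [List.foldl_cons, List.foldl_nil]
      have hg1 : PySem.List.pyGetD (xs ++ [x]) (xs.length : Int) [] = x := by
        rw [PySem.List.pyGetD_eq_getElem (xs ++ [x]) [] (by omega) (by simp)]
        simp
      have hg2 : PySem.List.pyGetD ((pvOT xs).1 ++ [(pvOT xs).2]) (xs.length : Int) 0 = (pvOT xs).2 := by
        rw [PySem.List.pyGetD_eq_getElem ((pvOT xs).1 ++ [(pvOT xs).2]) 0 (by omega)
            (by rw [List.length_append, pvOT_fst_length]; simp)]
        have hn : (xs.length : Int).toNat = (pvOT xs).1.length := by rw [pvOT_fst_length]; simp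
        simp [hn]
      rw [hg1, hg2]
      rfl
    · -- label lists
      show _ ++ _ = _
      rw [PySem.List.pyRange_one_append 0 (pvOT xs).2 ((pvOT xs).2 + (x.length : Int)) hc0 (by omega),
          List.map_append]

-- ===== VERDICT (by name: the statement is the Claim_ definition above) =====
theorem do_dictionary_label_list_spec : Claim_equal_do_dictionary_label_list := by
  intro image _
  show do_dictionary_label_list image = do_dictionary_label_list_alt image
  unfold do_dictionary_label_list do_dictionary_label_list_alt
  rw [pv_outer image]
  rfl
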